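-- pv_equiv track=rewrite | github.com/Rishitha7327/-User-Profile-Validation-System | Day-6.py | classify_students
-- ===== SOURCE A (Python) =====
-- def classify_students(data):
--     categories = {
--         "At Risk": [],
--         "Average": [],
--         "Good": [],
--         "Top Performer": []
--     }
--
--     for student in data:
--         sid, marks, attendance, assignment, _ = student
--
--         if marks < 40 or attendance < 50:
--             categories["At Risk"].append(sid)
--
--         elif marks > 90 and attendance > 80:
--             categories["Top Performer"].append(sid)
--
--         elif 71 <= marks <= 90:
--             categories["Good"].append(sid)
--
--         else:
--             categories["Average"].append(sid)
--
--     return categories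
-- ===== SOURCE B (Python) =====
-- def classify_students(data):
--     def at_risk(m, a):
--         return m < 40 or a < 50
--
--     def top(m, a):
--         return m > 90 and a > 80
--
--     def good(m, a):
--         return 71 <= m <= 90 and a >= 50
--
--     return {
--         "At Risk": [sid for sid, m, a, _asg, _ in data if at_risk(m, a)],
--         "Average": [sid for sid, m, a, _asg, _ in data
--                     if not at_risk(m, a) and not top(m, a) and not good(m, a)],
--         "Good": [sid for sid, m, a, _asg, _ in data if good(m, a)],
--         "Top Performer": [sid for sid, m, a, _asg, _ in data if top(m, a)],
--     }
-- ===== Notes on version B (the rewrite author's own statement) =====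
-- stated objective: alternative
-- what changed: Replaces the single branching loop that mutates lists inside a dict by four independent filtering comprehensions, one per category, each with the category's full (mutually exclusive) condition spelled out.
import Mathlib
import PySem

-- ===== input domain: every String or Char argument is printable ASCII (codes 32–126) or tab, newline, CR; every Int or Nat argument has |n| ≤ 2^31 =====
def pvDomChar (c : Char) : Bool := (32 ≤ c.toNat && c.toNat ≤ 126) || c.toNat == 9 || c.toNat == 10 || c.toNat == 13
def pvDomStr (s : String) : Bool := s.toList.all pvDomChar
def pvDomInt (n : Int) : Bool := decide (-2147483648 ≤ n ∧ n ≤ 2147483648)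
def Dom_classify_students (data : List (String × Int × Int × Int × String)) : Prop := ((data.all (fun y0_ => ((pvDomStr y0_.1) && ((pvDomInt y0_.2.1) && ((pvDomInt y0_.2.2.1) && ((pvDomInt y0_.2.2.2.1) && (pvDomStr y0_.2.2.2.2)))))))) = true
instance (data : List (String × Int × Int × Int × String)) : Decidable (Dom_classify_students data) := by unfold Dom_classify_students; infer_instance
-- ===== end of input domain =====

-- B replaces A's single branching loop (mutating lists inside a dict) by four independent
-- filter passes, one per category, with each category's full condition spelled out (objective: alternative).

-- ===== PORT A =====
-- one branching loop over data, appending sid to the matching list inside the dict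
def classify_students (data : List (String × Int × Int × Int × String)) : List (String × List String) :=
  let init : PySem.Dict String (List String) :=
    ((((PySem.Dict.empty.insert "At Risk" ([] : List String)).insert "Average" []).insert "Good" []).insert "Top Performer" [])
  (data.foldl (fun d s =>
      let sid := s.1
      let marks := s.2.1
      let attendance := s.2.2.1
      if marks < 40 ∨ attendance < 50 then d.modify "At Risk" [] (· ++ [sid])
      else if marks > 90 ∧ attendance > 80 then d.modify "Top Performer" [] (· ++ [sid])
      else if 71 ≤ marks ∧ marks ≤ 90 then d.modify "Good" [] (· ++ [sid])
      else d.modify "Average" [] (· ++ [sid])) init).items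

-- ===== PORT B =====
-- B-side helpers: the three named predicates of Source B
def pvAtRisk (m a : Int) : Bool := m < 40 || a < 50
def pvTop (m a : Int) : Bool := m > 90 && a > 80
def pvGood (m a : Int) : Bool := (71 ≤ m && m ≤ 90) && a ≥ 50

def classify_students_alt (data : List (String × Int × Int × Int × String)) : List (String × List String) :=
  [("At Risk", (data.filter (fun s => pvAtRisk s.2.1 s.2.2.1)).map (·.1)),
   ("Average", (data.filter (fun s => !pvAtRisk s.2.1 s.2.2.1 && !pvTop s.2.1 s.2.2.1 && !pvGood s.2.1 s.2.2.1)).map (·.1)),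
   ("Good", (data.filter (fun s => pvGood s.2.1 s.2.2.1)).map (·.1)),
   ("Top Performer", (data.filter (fun s => pvTop s.2.1 s.2.2.1)).map (·.1))]

-- ===== PRECONDITION & SPEC =====
def Spec_classify_students (data : List (String × Int × Int × Int × String)) (out : List (String × List String)) : Prop := out = classify_students_alt data
instance (data : List (String × Int × Int × Int × String)) (out : List (String × List String)) : Decidable (Spec_classify_students data out) := by unfold Spec_classify_students; infer_instance

-- ===== CLAIM (what is proved, stated in full; the proofs are below) =====
def Claim_equal_classify_students : Prop := ∀ (data : List (String × Int × Int × Int × String)), Dom_classify_students data → Spec_classify_students data (classify_students data)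

-- ===== LEMMAS AND PROOFS =====

-- the loop invariant: folding A's step over any dict of the fixed four-key shape appends
-- exactly the four B-side filtered lists
theorem classify_loop_inv (data : List (String × Int × Int × Int × String))
    (ar av gd tp : List String) :
    (data.foldl (fun d s =>
      let sid := s.1
      let marks := s.2.1
      let attendance := s.2.2.1
      if marks < 40 ∨ attendance < 50 then d.modify "At Risk" [] (· ++ [sid])
      else if marks > 90 ∧ attendance > 80 then d.modify "Top Performer" [] (· ++ [sid])
      else if 71 ≤ marks ∧ marks ≤ 90 then d.modify "Good" [] (· ++ [sid])
      else d.modify "Average" [] (· ++ [sid]))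
      (PySem.Dict.mk [("At Risk", ar), ("Average", av), ("Good", gd), ("Top Performer", tp)])).items
    = [("At Risk", ar ++ (data.filter (fun s => pvAtRisk s.2.1 s.2.2.1)).map (·.1)),
       ("Average", av ++ (data.filter (fun s => !pvAtRisk s.2.1 s.2.2.1 && !pvTop s.2.1 s.2.2.1 && !pvGood s.2.1 s.2.2.1)).map (·.1)),
       ("Good", gd ++ (data.filter (fun s => pvGood s.2.1 s.2.2.1)).map (·.1)),
       ("Top Performer", tp ++ (data.filter (fun s => pvTop s.2.1 s.2.2.1)).map (·.1))] := by
  induction data generalizing ar av gd tp with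
  | nil => simp [List.foldl, List.filter]
  | cons x xs ih =>
    obtain ⟨sid, m, a, asg, rest⟩ := x
    simp only [List.foldl_cons]
    by_cases h1 : m < 40 ∨ a < 50
    · rw [if_pos h1]
      have hmod : (PySem.Dict.mk [("At Risk", ar), ("Average", av), ("Good", gd), ("Top Performer", tp)]).modify "At Risk" [] (· ++ [sid])
          = PySem.Dict.mk [("At Risk", ar ++ [sid]), ("Average", av), ("Good", gd), ("Top Performer", tp)] := by
        simp [PySem.Dict.modify, PySem.Dict.insert, PySem.Dict.getD, PySem.Dict.get?, PySem.Dict.contains]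
      rw [hmod, ih]
      have hp1 : pvAtRisk m a = true := by simp [pvAtRisk]; omega
      have hp2 : pvTop m a = false := by simp [pvTop]; omega
      have hp3 : pvGood m a = false := by simp [pvGood]; omega
      simp [List.filter, hp1, hp2, hp3]
    · rw [if_neg h1]
      have hp1 : pvAtRisk m a = false := by simp [pvAtRisk]; omega
      by_cases h2 : m > 90 ∧ a > 80
      · rw [if_pos h2]
        have hmod : (PySem.Dict.mk [("At Risk", ar), ("Average", av), ("Good", gd), ("Top Performer", tp)]).modify "Top Performer" [] (· ++ [sid])
            = PySem.Dict.mk [("At Risk", ar), ("Average", av), ("Good", gd), ("Top Performer", tp ++ [sid])] := by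
          simp [PySem.Dict.modify, PySem.Dict.insert, PySem.Dict.getD, PySem.Dict.get?, PySem.Dict.contains]
        rw [hmod, ih]
        have hp2 : pvTop m a = true := by simp [pvTop]; omega
        have hp3 : pvGood m a = false := by simp [pvGood]; omega
        simp [List.filter, hp1, hp2, hp3]
      · rw [if_neg h2]
        have hp2 : pvTop m a = false := by simp [pvTop]; omega
        by_cases h3 : 71 ≤ m ∧ m ≤ 90
        · rw [if_pos h3]
          have hmod : (PySem.Dict.mk [("At Risk", ar), ("Average", av), ("Good", gd), ("Top Performer", tp)]).modify "Good" [] (· ++ [sid])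
              = PySem.Dict.mk [("At Risk", ar), ("Average", av), ("Good", gd ++ [sid]), ("Top Performer", tp)] := by
            simp [PySem.Dict.modify, PySem.Dict.insert, PySem.Dict.getD, PySem.Dict.get?, PySem.Dict.contains]
          rw [hmod, ih]
          have hp3 : pvGood m a = true := by simp [pvGood]; omega
          simp [List.filter, hp1, hp2, hp3]
        · rw [if_neg h3]
          have hmod : (PySem.Dict.mk [("At Risk", ar), ("Average", av), ("Good", gd), ("Top Performer", tp)]).modify "Average" [] (· ++ [sid])
              = PySem.Dict.mk [("At Risk", ar), ("Average", av ++ [sid]), ("Good", gd), ("Top Performer", tp)] := by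
            simp [PySem.Dict.modify, PySem.Dict.insert, PySem.Dict.getD, PySem.Dict.get?, PySem.Dict.contains]
          rw [hmod, ih]
          have hp3 : pvGood m a = false := by simp [pvGood]; omega
          simp [List.filter, hp1, hp2, hp3]

-- ===== VERDICT (by name: the statement is the Claim_ definition above) =====
theorem classify_students_spec : Claim_equal_classify_students := by
  intro data _
  show classify_students data = classify_students_alt data
  have hinit : ((((PySem.Dict.empty.insert "At Risk" ([] : List String)).insert "Average" []).insert "Good" []).insert "Top Performer" [])
      = PySem.Dict.mk [("At Risk", []), ("Average", []), ("Good", []), ("Top Performer", [])] := by decide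
  unfold classify_students classify_students_alt
  rw [hinit, classify_loop_inv]
  simp
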